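-- pv_equiv track=rewrite | github.com/jrenaldi79/writing-style | skills/writing-style/scripts/enrich_emails.py | classify_audience
-- ===== SOURCE A (Python) =====
-- from typing import Dict, List, Optional, Tuple
--
-- def classify_audience(recipient_domains: List[str], user_domain: str) -> str:
--     """Classify audience as internal, external, or mixed."""
--     if not recipient_domains:
--         return 'unknown'
--
--     internal_count = sum(1 for d in recipient_domains if d == user_domain)
--     external_count = len(recipient_domains) - internal_count
--
--     if external_count == 0:
--         return 'internal'
--     elif internal_count == 0:
--         return 'external'
--     else:
--         return 'mixed'
-- ===== SOURCE B (Python) =====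
-- def classify_audience(recipient_domains, user_domain):
--     """Classify audience as internal, external, or mixed."""
--     distinct = set(recipient_domains)
--     if not distinct:
--         return 'unknown'
--     if user_domain not in distinct:
--         return 'external'
--     if len(distinct) == 1:
--         return 'internal'
--     return 'mixed'
-- ===== Notes on version B (the rewrite author's own statement) =====
-- stated objective: alternative
-- what changed: Dedupes the recipient list into a set once and classifies from the set's cardinality and user-domain membership (|set|==1 with membership means internal) instead of counting internal matches and subtracting.
import Mathlib
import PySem

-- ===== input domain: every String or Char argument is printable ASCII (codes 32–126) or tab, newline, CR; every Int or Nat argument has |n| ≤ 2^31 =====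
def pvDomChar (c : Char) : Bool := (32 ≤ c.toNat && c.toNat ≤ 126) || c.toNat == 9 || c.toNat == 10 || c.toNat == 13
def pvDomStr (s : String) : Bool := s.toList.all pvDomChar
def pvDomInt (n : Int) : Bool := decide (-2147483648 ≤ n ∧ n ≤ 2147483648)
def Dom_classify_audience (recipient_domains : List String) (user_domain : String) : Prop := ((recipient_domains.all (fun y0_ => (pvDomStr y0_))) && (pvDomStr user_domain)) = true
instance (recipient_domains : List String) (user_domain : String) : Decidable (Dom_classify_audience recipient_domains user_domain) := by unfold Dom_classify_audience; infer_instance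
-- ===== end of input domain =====

-- B dedupes the recipients into a set and classifies from its cardinality and user-domain membership instead of counting matches (alternative decomposition, same O(n) cost).


-- ===== PORT A =====
-- sum(1 for d in recipient_domains if d == user_domain) as a left fold over the list
def classify_audience (recipient_domains : List String) (user_domain : String) : String :=
  if recipient_domains = [] then "unknown"
  else
    let internal_count : Int :=
      recipient_domains.foldl (fun acc d => if d = user_domain then acc + 1 else acc) 0
    let external_count : Int := (recipient_domains.length : Int) - internal_count
    if external_count = 0 then "internal"
    else if internal_count = 0 then "external"
    else "mixed"

-- ===== PORT B =====
-- set(recipient_domains) = PySem.Set.ofList; len / membership on the set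
def classify_audience_alt (recipient_domains : List String) (user_domain : String) : String :=
  let distinct : PySem.Set String := PySem.Set.ofList recipient_domains
  if distinct = [] then "unknown"
  else if ¬ (PySem.Set.contains distinct user_domain = true) then "external"
  else if PySem.Set.len distinct = 1 then "internal"
  else "mixed"

-- ===== PRECONDITION & SPEC =====
def Spec_classify_audience (recipient_domains : List String) (user_domain : String) (out : String) : Prop := out = classify_audience_alt recipient_domains user_domain
instance (recipient_domains : List String) (user_domain : String) (out : String) : Decidable (Spec_classify_audience recipient_domains user_domain out) := by unfold Spec_classify_audience; infer_instance

-- ===== CLAIM (what is proved, stated in full; the proofs are below) =====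
def Claim_equal_classify_audience : Prop := ∀ (recipient_domains : List String) (user_domain : String), Dom_classify_audience recipient_domains user_domain → Spec_classify_audience recipient_domains user_domain (classify_audience recipient_domains user_domain)

-- ===== LEMMAS AND PROOFS =====
theorem ca_foldl_count (rd : List String) (ud : String) (acc : Int) :
    rd.foldl (fun acc d => if d = ud then acc + 1 else acc) acc
      = acc + (rd.countP (fun d => d = ud) : Int) := by
  induction rd generalizing acc with
  | nil => simp
  | cons x xs ih =>
    simp only [List.foldl_cons, List.countP_cons, ih]
    by_cases h : x = ud
    · simp [h]; ring
    · simp [h]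

theorem ca_ofList_singleton (rd : List String) (ud : String) (hmem : ud ∈ rd)
    (hall : ∀ d ∈ rd, d = ud) : PySem.Set.ofList rd = [ud] := by
  have h1 : ∀ x ∈ PySem.Set.ofList rd, x = ud := by
    intro x hx
    exact hall x ((PySem.Set.mem_ofList rd x).mp hx)
  have h2 : ud ∈ PySem.Set.ofList rd := (PySem.Set.mem_ofList rd ud).mpr hmem
  have hnd : (PySem.Set.ofList rd).Nodup := PySem.Set.nodup_ofList rd
  cases hs : PySem.Set.ofList rd with
  | nil => rw [hs] at h2; cases h2
  | cons y ys =>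
    rw [hs] at h1 h2 hnd
    have hy : y = ud := h1 y List.mem_cons_self
    cases ys with
    | nil => simp [hy]
    | cons z zs =>
      exfalso
      have hz : z = ud := h1 z (by simp)
      have := List.nodup_cons.mp hnd
      exact this.1 (by simp [hy, hz])

-- ===== VERDICT (by name: the statement is the Claim_ definition above) =====
theorem classify_audience_spec : Claim_equal_classify_audience := by
  intro rd ud _
  unfold Spec_classify_audience classify_audience classify_audience_alt
  by_cases hnil : rd = []
  · simp [hnil, PySem.Set.ofList]
  · have hsne : PySem.Set.ofList rd ≠ [] := by
      obtain ⟨x, hx⟩ := List.exists_mem_of_ne_nil rd hnil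
      intro h
      have := (PySem.Set.mem_ofList rd x).mpr hx
      rw [h] at this; cases this
    simp only [hnil, if_false, hsne, ca_foldl_count, zero_add]
    by_cases hmem : ud ∈ rd
    · have hcont : PySem.Set.contains (PySem.Set.ofList rd) ud = true := by
        simp [PySem.Set.contains, PySem.Set.mem_ofList rd ud, hmem]
      have hcpos : 0 < rd.countP (fun d => d = ud) :=
        List.countP_pos_iff.mpr ⟨ud, hmem, by simp⟩
      by_cases hall : ∀ d ∈ rd, d = ud
      · have hcnt : rd.countP (fun d => d = ud) = rd.length := by
          rw [List.countP_eq_length]; simpa using hall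
        have hlen : List.length (PySem.Set.ofList rd) = 1 := by
          simp [ca_ofList_singleton rd ud hmem hall]
        simp [hcnt, hmem, hlen]
      · simp only [not_forall] at hall
        obtain ⟨x, hx, hxne⟩ := hall
        have hle : rd.countP (fun d => d = ud) ≤ rd.length := List.countP_le_length
        have hcntlt : rd.countP (fun d => d = ud) < rd.length := by
          rcases lt_or_eq_of_le hle with h | h
          · exact h
          · exact absurd (by simpa using List.countP_eq_length.mp h x hx) hxne
        have hext : ((rd.length : Int) - (rd.countP (fun d => d = ud) : Int)) ≠ 0 := by omega
        have hic : (rd.countP (fun d => d = ud) : Int) ≠ 0 := by omega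
        have hlen : List.length (PySem.Set.ofList rd) ≠ 1 := by
          intro h
          have hnd : (PySem.Set.ofList rd).Nodup := PySem.Set.nodup_ofList rd
          have h2 : ud ∈ PySem.Set.ofList rd := (PySem.Set.mem_ofList rd ud).mpr hmem
          have h3 : x ∈ PySem.Set.ofList rd := (PySem.Set.mem_ofList rd x).mpr hx
          obtain ⟨y, hy⟩ := List.length_eq_one_iff.mp h
          rw [hy] at h2 h3
          simp at h2 h3
          exact hxne (h3.trans h2.symm)
        simp [hext, hmem, hlen]
    · have hcont : PySem.Set.contains (PySem.Set.ofList rd) ud = false := by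
        simp [PySem.Set.contains, PySem.Set.mem_ofList rd ud, hmem]
      have hcz : rd.countP (fun d => d = ud) = 0 := by
        rw [List.countP_eq_zero]
        intro y hy h
        exact hmem (by simpa [show y = ud by simpa using h] using hy)
      have hlen : rd.length ≠ 0 := fun h => hnil (List.eq_nil_of_length_eq_zero h)
      have hext : ((rd.length : Int) - (rd.countP (fun d => d = ud) : Int)) ≠ 0 := by omega
      simp [hcz, hmem, hnil]
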